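-- pv_equiv track=rewrite | github.com/jg1970jg/Tribunal-SaaS | Referencia antiga/src/pipeline/processor.py | _normalize_role_for_perf
-- ===== SOURCE A (Python) =====
-- def _normalize_role_for_perf(role_name: str) -> str:
--     """Normaliza role name para performance tracking."""
--     r = role_name.lower()
--     if "extrator" in r or "extractor" in r:
--         for tag in ("e1", "e2", "e3", "e4", "e5"):
--             if tag in r:
--                 return tag.upper()
--         return "E1"
--     if "auditor" in r or "audit" in r:
--         for tag in ("a1", "a2", "a3", "a4"):
--             if tag in r:
--                 return tag.upper()
--         # auditor_1 -> A1, auditor_2 -> A2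
--         for i in range(1, 5):
--             if f"_{i}" in r:
--                 return f"A{i}"
--         return "A1"
--     if "relator" in r or "judge" in r or "juiz" in r:
--         for tag in ("j1", "j2", "j3"):
--             if tag in r:
--                 return tag.upper()
--         for i in range(1, 4):
--             if f"_{i}" in r:
--                 return f"J{i}"
--         return "J1"
--     if "presidente" in r or "conselheiro" in r:
--         return "PRESIDENTE"
--     if "agregador" in r:
--         return "AGREGADOR"
--     if "chefe" in r or "consolidador" in r:
--         return "CONSOLIDADOR"
--     return role_name[:20]
-- ===== SOURCE B (Python) =====
-- # Different algorithm: one left-to-right scan of the lowercased string collects every keyword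
-- # occurrence into a found-set (poor man's multi-pattern matcher); a separate decision step then
-- # reads only that set, with one generic pick() for the three lettered categories.
-- _PATTERNS = (
--     "extrator", "extractor", "auditor", "audit", "relator", "judge", "juiz",
--     "presidente", "conselheiro", "agregador", "chefe", "consolidador",
--     "e1", "e2", "e3", "e4", "e5", "a1", "a2", "a3", "a4", "j1", "j2", "j3",
--     "_1", "_2", "_3", "_4",
-- )
--
--
-- def _normalize_role_for_perf(role_name: str) -> str:
--     r = role_name.lower()
--     found = set()
--     for i in range(len(r)):
--         for p in _PATTERNS:
--             if r.startswith(p, i):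
--                 found.add(p)
--
--     def pick(letter, hi, underscore):
--         for k in range(1, hi + 1):
--             if f"{letter}{k}" in found:
--                 return f"{letter.upper()}{k}"
--         if underscore:
--             for k in range(1, hi + 1):
--                 if f"_{k}" in found:
--                     return f"{letter.upper()}{k}"
--         return letter.upper() + "1"
--
--     if "extrator" in found or "extractor" in found:
--         return pick("e", 5, False)
--     if "auditor" in found or "audit" in found:
--         return pick("a", 4, True)
--     if "relator" in found or "judge" in found or "juiz" in found:
--         return pick("j", 3, True)
--     if "presidente" in found or "conselheiro" in found:
--         return "PRESIDENTE"
--     if "agregador" in found: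
--         return "AGREGADOR"
--     if "chefe" in found or "consolidador" in found:
--         return "CONSOLIDADOR"
--     return role_name[:20]
-- ===== Notes on version B (the rewrite author's own statement) =====
-- stated objective: alternative
-- what changed: Instead of A's cascade of repeated substring searches, B makes one left-to-right scan over the lowercased string collecting every keyword occurrence into a found-set, then a separate decision step (with one generic pick() for the three lettered categories) reads only that set.
import Mathlib
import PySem

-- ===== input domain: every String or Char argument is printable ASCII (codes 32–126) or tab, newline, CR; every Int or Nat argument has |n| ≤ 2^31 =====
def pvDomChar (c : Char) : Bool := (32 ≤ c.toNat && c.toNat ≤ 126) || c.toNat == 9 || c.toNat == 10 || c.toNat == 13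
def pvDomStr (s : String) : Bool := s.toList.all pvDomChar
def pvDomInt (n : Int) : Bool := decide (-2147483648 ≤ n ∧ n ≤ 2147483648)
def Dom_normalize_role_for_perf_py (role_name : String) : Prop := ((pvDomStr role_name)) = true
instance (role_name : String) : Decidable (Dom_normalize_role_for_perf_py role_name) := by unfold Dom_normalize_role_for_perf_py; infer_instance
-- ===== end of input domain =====

-- B replaces A's cascade of repeated substring searches by one left-to-right scan that collects
-- every keyword occurrence into a found-set, read by a separate decision step (alternative, same cost).

-- ===== PORT A =====
-- Literal transliteration of A: a cascade of 'in'-tests; each for-loop is a find? over its literal tuple.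
def normalize_role_for_perf_py (role_name : String) : String :=
  let r := PySem.Str.lower role_name
  if PySem.Str.isIn "extrator" r || PySem.Str.isIn "extractor" r then
    match ["e1", "e2", "e3", "e4", "e5"].find? (fun tag => PySem.Str.isIn tag r) with
    | some tag => PySem.Str.upper tag
    | none => "E1"
  else if PySem.Str.isIn "auditor" r || PySem.Str.isIn "audit" r then
    match ["a1", "a2", "a3", "a4"].find? (fun tag => PySem.Str.isIn tag r) with
    | some tag => PySem.Str.upper tag
    | none =>
      match (PySem.List.pyRange 1 5 1).find?
          (fun i => PySem.Str.isIn (String.ofList ('_' :: PySem.Int.toChars i)) r) with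
      | some i => String.ofList ('A' :: PySem.Int.toChars i)
      | none => "A1"
  else if PySem.Str.isIn "relator" r || PySem.Str.isIn "judge" r || PySem.Str.isIn "juiz" r then
    match ["j1", "j2", "j3"].find? (fun tag => PySem.Str.isIn tag r) with
    | some tag => PySem.Str.upper tag
    | none =>
      match (PySem.List.pyRange 1 4 1).find?
          (fun i => PySem.Str.isIn (String.ofList ('_' :: PySem.Int.toChars i)) r) with
      | some i => String.ofList ('J' :: PySem.Int.toChars i)
      | none => "J1"
  else if PySem.Str.isIn "presidente" r || PySem.Str.isIn "conselheiro" r then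
    "PRESIDENTE"
  else if PySem.Str.isIn "agregador" r then
    "AGREGADOR"
  else if PySem.Str.isIn "chefe" r || PySem.Str.isIn "consolidador" r then
    "CONSOLIDADOR"
  else
    PySem.Str.slice role_name none (some 20)

-- ===== PORT B =====
-- The fixed keyword table _PATTERNS of Source B (as lists of chars; string facts live on the list side).
def pvPatterns : List (List Char) :=
  ["extrator".toList, "extractor".toList, "auditor".toList, "audit".toList, "relator".toList,
   "judge".toList, "juiz".toList, "presidente".toList, "conselheiro".toList, "agregador".toList,
   "chefe".toList, "consolidador".toList,
   "e1".toList, "e2".toList, "e3".toList, "e4".toList, "e5".toList,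
   "a1".toList, "a2".toList, "a3".toList, "a4".toList,
   "j1".toList, "j2".toList, "j3".toList,
   "_1".toList, "_2".toList, "_3".toList, "_4".toList]

-- Source B's scanning loop: for i in range(len(r)): for p in _PATTERNS: if r.startswith(p, i): found.add(p)
-- (r.startswith(p, i) with 0 ≤ i < len(r) is exactly startswith on r.drop i — exact here)
def pvScan (r : List Char) : PySem.Set (List Char) :=
  (List.range r.length).foldl
    (fun acc i => pvPatterns.foldl
      (fun acc p => if PySem.Chars.startswith (r.drop i) p then PySem.Set.add acc p else acc) acc)
    PySem.Set.empty

-- Source B's pick(letter, hi, underscore): range(1, hi+1) is List.range' 1 hi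
def pvPick (letter : Char) (hi : Nat) (underscore : Bool) (found : PySem.Set (List Char)) : String :=
  match (List.range' 1 hi).find? (fun (k : Nat) => found.contains (letter :: PySem.Int.toChars (k : Int))) with
  | some k => String.ofList (letter.toUpper :: PySem.Int.toChars ((k : Nat) : Int))
  | none =>
    if underscore then
      match (List.range' 1 hi).find? (fun (k : Nat) => found.contains ('_' :: PySem.Int.toChars (k : Int))) with
      | some k => String.ofList (letter.toUpper :: PySem.Int.toChars ((k : Nat) : Int))
      | none => String.ofList [letter.toUpper, '1']
    else String.ofList [letter.toUpper, '1']

def normalize_role_for_perf_py_alt (role_name : String) : String :=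
  let r := PySem.Chars.lower role_name.toList
  let found := pvScan r
  if found.contains "extrator".toList || found.contains "extractor".toList then
    pvPick 'e' 5 false found
  else if found.contains "auditor".toList || found.contains "audit".toList then
    pvPick 'a' 4 true found
  else if found.contains "relator".toList || found.contains "judge".toList || found.contains "juiz".toList then
    pvPick 'j' 3 true found
  else if found.contains "presidente".toList || found.contains "conselheiro".toList then
    "PRESIDENTE"
  else if found.contains "agregador".toList then
    "AGREGADOR"
  else if found.contains "chefe".toList || found.contains "consolidador".toList then
    "CONSOLIDADOR"
  else
    PySem.Str.slice role_name none (some 20)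

-- ===== PRECONDITION & SPEC =====
def Spec_normalize_role_for_perf_py (role_name : String) (out : String) : Prop := out = normalize_role_for_perf_py_alt role_name
instance (role_name : String) (out : String) : Decidable (Spec_normalize_role_for_perf_py role_name out) := by unfold Spec_normalize_role_for_perf_py; infer_instance

-- ===== CLAIM =====
def Claim_equal_normalize_role_for_perf_py : Prop := ∀ (role_name : String), Dom_normalize_role_for_perf_py role_name → Spec_normalize_role_for_perf_py role_name (normalize_role_for_perf_py role_name)

-- ===== LEMMAS AND PROOFS =====

-- membership in the inner (pattern) fold of pvScan
lemma pv_mem_inner (s : List Char) (ps : List (List Char)) (acc : PySem.Set (List Char)) (x : List Char) :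
    x ∈ ps.foldl (fun a p => if PySem.Chars.startswith s p then PySem.Set.add a p else a) acc ↔
      x ∈ acc ∨ (x ∈ ps ∧ PySem.Chars.startswith s x = true) := by
  induction ps generalizing acc with
  | nil => simp
  | cons p ps ih =>
    simp only [List.foldl_cons, ih]
    by_cases h : PySem.Chars.startswith s p
    · rw [if_pos h]
      simp only [PySem.Set.mem_add, List.mem_cons]
      constructor
      · rintro ((hx | rfl) | ⟨hp, hs⟩)
        · exact Or.inl hx
        · exact Or.inr ⟨Or.inl rfl, h⟩
        · exact Or.inr ⟨Or.inr hp, hs⟩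
      · rintro (hx | ⟨(rfl | hp), hs⟩)
        · exact Or.inl (Or.inl hx)
        · exact Or.inl (Or.inr rfl)
        · exact Or.inr ⟨hp, hs⟩
    · rw [if_neg h]
      simp only [List.mem_cons]
      constructor
      · rintro (hx | ⟨hp, hs⟩)
        · exact Or.inl hx
        · exact Or.inr ⟨Or.inr hp, hs⟩
      · rintro (hx | ⟨(rfl | hp), hs⟩)
        · exact Or.inl hx
        · exact absurd hs h
        · exact Or.inr ⟨hp, hs⟩

-- membership in the outer (position) fold of pvScan
lemma pv_mem_outer (r : List Char) (l : List Nat) (acc : PySem.Set (List Char)) (x : List Char) :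
    x ∈ l.foldl
        (fun acc i => pvPatterns.foldl
          (fun acc p => if PySem.Chars.startswith (r.drop i) p then PySem.Set.add acc p else acc) acc)
        acc ↔
      x ∈ acc ∨ (x ∈ pvPatterns ∧ ∃ i ∈ l, PySem.Chars.startswith (r.drop i) x = true) := by
  induction l generalizing acc with
  | nil => simp
  | cons i l ih =>
    simp only [List.foldl_cons, ih, pv_mem_inner, List.mem_cons]
    constructor
    · rintro ((hx | ⟨hp, hs⟩) | ⟨hp, j, hj, hs⟩)
      · exact Or.inl hx
      · exact Or.inr ⟨hp, i, Or.inl rfl, hs⟩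
      · exact Or.inr ⟨hp, j, Or.inr hj, hs⟩
    · rintro (hx | ⟨hp, j, (rfl | hj), hs⟩)
      · exact Or.inl (Or.inl hx)
      · exact Or.inl (Or.inr ⟨hp, hs⟩)
      · exact Or.inr ⟨hp, j, hj, hs⟩

lemma pv_mem_scan (r x : List Char) :
    x ∈ pvScan r ↔ x ∈ pvPatterns ∧ ∃ i < r.length, PySem.Chars.startswith (r.drop i) x = true := by
  unfold pvScan
  rw [pv_mem_outer]
  simp [PySem.Set.empty, List.mem_range]

-- a bounded startswith-somewhere is exactly Python's 'sub in s', for nonempty sub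
lemma pv_exists_startswith_iff_isIn (r x : List Char) (hx : x ≠ []) :
    (∃ i < r.length, PySem.Chars.startswith (r.drop i) x = true) ↔ PySem.Chars.isIn x r = true := by
  rw [← PySem.Chars.exists_prefix_drop_iff_isIn]
  constructor
  · rintro ⟨i, _, h⟩
    exact ⟨i, (PySem.Chars.startswith_iff _ _).1 h⟩
  · rintro ⟨j, h⟩
    by_cases hj : j < r.length
    · exact ⟨j, hj, (PySem.Chars.startswith_iff _ _).2 h⟩
    · exfalso
      rw [List.drop_eq_nil_of_le (by omega)] at h
      exact hx (List.prefix_nil.mp h)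

lemma pv_contains_scan (r x : List Char) (hx : x ∈ pvPatterns) (hne : x ≠ []) :
    (pvScan r).contains x = PySem.Chars.isIn x r := by
  rw [Bool.eq_iff_iff, PySem.Set.contains_iff, pv_mem_scan, pv_exists_startswith_iff_isIn r x hne]
  tauto

-- if-shaped unfolding of find? on a cons (so that split_ifs can drive the case analysis)
lemma pv_find?_cons {α : Type} (p : α → Bool) (a : α) (l : List α) :
    List.find? p (a :: l) = if p a then some a else List.find? p l := by
  by_cases h : p a <;> simp [h]

-- ===== VERDICT =====
set_option maxHeartbeats 2000000 in
theorem normalize_role_for_perf_py_spec : Claim_equal_normalize_role_for_perf_py := by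
  intro role_name _
  unfold Spec_normalize_role_for_perf_py
  have hnil : ∀ y ∈ pvPatterns, y ≠ [] := by decide
  have hc : ∀ x ∈ pvPatterns,
      (pvScan (PySem.Chars.lower role_name.toList)).contains x
        = PySem.Chars.isIn x (PySem.Chars.lower role_name.toList) :=
    fun x hx => pv_contains_scan _ x hx (hnil x hx)
  simp only [normalize_role_for_perf_py, normalize_role_for_perf_py_alt, pvPick,
    hc "extrator".toList (by decide),
    hc "extractor".toList (by decide),
    hc "auditor".toList (by decide),
    hc "audit".toList (by decide),
    hc "relator".toList (by decide),
    hc "judge".toList (by decide),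
    hc "juiz".toList (by decide),
    hc "presidente".toList (by decide),
    hc "conselheiro".toList (by decide),
    hc "agregador".toList (by decide),
    hc "chefe".toList (by decide),
    hc "consolidador".toList (by decide),
    hc ['e','1'] (by decide),
    hc ['e','2'] (by decide),
    hc ['e','3'] (by decide),
    hc ['e','4'] (by decide),
    hc ['e','5'] (by decide),
    hc ['a','1'] (by decide),
    hc ['a','2'] (by decide),
    hc ['a','3'] (by decide),
    hc ['a','4'] (by decide),
    hc ['j','1'] (by decide),
    hc ['j','2'] (by decide),
    hc ['j','3'] (by decide),
    hc ['_','1'] (by decide),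
    hc ['_','2'] (by decide),
    hc ['_','3'] (by decide),
    hc ['_','4'] (by decide),
    (by decide : PySem.List.pyRange 1 5 1 = [(1:Int),2,3,4]),
    (by decide : PySem.List.pyRange 1 4 1 = [(1:Int),2,3]),
    (show List.range' 1 5 = [1,2,3,4,5] from rfl),
    (show List.range' 1 4 = [1,2,3,4] from rfl),
    (show List.range' 1 3 = [1,2,3] from rfl),
    pv_find?_cons, List.find?_nil, Bool.false_eq_true, if_false, if_true,
    PySem.Str.isIn_eq, PySem.Str.toList_lower,
    (by decide : "e1".toList = ['e','1']),
    (by decide : ('e' :: PySem.Int.toChars ((1:Nat):Int)) = ['e','1']),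
    (by decide : "e2".toList = ['e','2']),
    (by decide : ('e' :: PySem.Int.toChars ((2:Nat):Int)) = ['e','2']),
    (by decide : "e3".toList = ['e','3']),
    (by decide : ('e' :: PySem.Int.toChars ((3:Nat):Int)) = ['e','3']),
    (by decide : "e4".toList = ['e','4']),
    (by decide : ('e' :: PySem.Int.toChars ((4:Nat):Int)) = ['e','4']),
    (by decide : "e5".toList = ['e','5']),
    (by decide : ('e' :: PySem.Int.toChars ((5:Nat):Int)) = ['e','5']),
    (by decide : "a1".toList = ['a','1']),
    (by decide : ('a' :: PySem.Int.toChars ((1:Nat):Int)) = ['a','1']),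
    (by decide : "a2".toList = ['a','2']),
    (by decide : ('a' :: PySem.Int.toChars ((2:Nat):Int)) = ['a','2']),
    (by decide : "a3".toList = ['a','3']),
    (by decide : ('a' :: PySem.Int.toChars ((3:Nat):Int)) = ['a','3']),
    (by decide : "a4".toList = ['a','4']),
    (by decide : ('a' :: PySem.Int.toChars ((4:Nat):Int)) = ['a','4']),
    (by decide : "j1".toList = ['j','1']),
    (by decide : ('j' :: PySem.Int.toChars ((1:Nat):Int)) = ['j','1']),
    (by decide : "j2".toList = ['j','2']),
    (by decide : ('j' :: PySem.Int.toChars ((2:Nat):Int)) = ['j','2']),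
    (by decide : "j3".toList = ['j','3']),
    (by decide : ('j' :: PySem.Int.toChars ((3:Nat):Int)) = ['j','3']),
    (by decide : "_1".toList = ['_','1']),
    (by decide : String.ofList ('_' :: PySem.Int.toChars (1:Int)) = "_1"),
    (by decide : "_2".toList = ['_','2']),
    (by decide : String.ofList ('_' :: PySem.Int.toChars (2:Int)) = "_2"),
    (by decide : "_3".toList = ['_','3']),
    (by decide : String.ofList ('_' :: PySem.Int.toChars (3:Int)) = "_3"),
    (by decide : "_4".toList = ['_','4']),
    (by decide : String.ofList ('_' :: PySem.Int.toChars (4:Int)) = "_4"),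
    (by decide : ('_' :: PySem.Int.toChars ((1:Nat):Int)) = ['_','1']),
    (by decide : ('_' :: PySem.Int.toChars ((2:Nat):Int)) = ['_','2']),
    (by decide : ('_' :: PySem.Int.toChars ((3:Nat):Int)) = ['_','3']),
    (by decide : ('_' :: PySem.Int.toChars ((4:Nat):Int)) = ['_','4']),
    (by decide : String.ofList ['e'.toUpper, '1'] = "E1"),
    (by decide : String.ofList ['a'.toUpper, '1'] = "A1"),
    (by decide : String.ofList ['j'.toUpper, '1'] = "J1")]
  split_ifs <;> rfl
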